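-- pv_equiv track=rewrite | github.com/n11ckz/zavodov-vsuet | Lesson10/Task1/Task1.py | isMagicMatrix
-- ===== SOURCE A (Python) =====
-- def isSquareMatrix(array: list) -> bool:
--     lengthToCompare = len(array)
--     for i in range(len(array)):
--         if len(array[i]) != lengthToCompare:
--             return False
--     return True
--
-- def isMagicMatrix(array: list) -> bool:
--     if not isSquareMatrix(array):
--         return False
--     sumToCompare = sum(array[0])
--     rowSum, columnSum = 0, 0
--     for i in range(len(array)):
--         rowSum = sum(array[i])
--         for j in range(len(array[i])):
--             columnSum += array[j][i]
--         if (rowSum != sumToCompare) or (columnSum != sumToCompare):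
--             return False
--         rowSum, columnSum = 0, 0
--     return True
-- ===== SOURCE B (Python) =====
-- def isMagicMatrix(array: list) -> bool:
--     n = len(array)
--     if any(len(row) != n for row in array):
--         return False
--     col_sums = [0] * n
--     all_sums = set()
--     for row in array:
--         all_sums.add(sum(row))
--         col_sums = [c + x for c, x in zip(col_sums, row)]
--     all_sums.update(col_sums)
--     return len(all_sums) == 1
-- ===== Notes on version B (the rewrite author's own statement) =====
-- stated objective: alternative
-- what changed: Instead of comparing each sum against sum(array[0]) in an interleaved nested accumulator loop, B makes one pass over the rows maintaining a running column-sum vector (elementwise zip addition) while collecting row sums into a set, then dumps the column sums into the same set and decides by whether the set of all 2n sums is a singleton.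
import Mathlib
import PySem

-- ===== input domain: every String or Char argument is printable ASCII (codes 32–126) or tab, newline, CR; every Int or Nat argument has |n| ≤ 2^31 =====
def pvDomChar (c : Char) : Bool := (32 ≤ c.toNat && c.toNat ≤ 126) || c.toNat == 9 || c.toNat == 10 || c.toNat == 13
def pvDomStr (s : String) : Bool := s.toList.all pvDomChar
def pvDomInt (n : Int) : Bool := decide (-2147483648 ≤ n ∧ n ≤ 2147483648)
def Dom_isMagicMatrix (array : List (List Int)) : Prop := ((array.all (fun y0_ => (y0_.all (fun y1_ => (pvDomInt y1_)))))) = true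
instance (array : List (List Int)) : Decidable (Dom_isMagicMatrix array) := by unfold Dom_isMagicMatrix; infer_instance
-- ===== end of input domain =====

-- B replaces A's per-index comparisons against sum(array[0]) by one row pass with a running
-- column-sum vector plus a set of all row/column sums, answering via "is the set a singleton".

-- ===== PORT A =====
def isSquareMatrix (array : List (List Int)) : Bool :=
  (List.range array.length).all (fun i => (array.getD i []).length == array.length)

def pvALoop (array : List (List Int)) (s : Int) : List Nat → Bool
  | [] => true
  | i :: rest =>
    let rowSum := (array.getD i []).sum
    let columnSum := (List.range (array.getD i []).length).foldl
      (fun acc j => acc + (array.getD j []).getD i 0) 0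
    if rowSum ≠ s ∨ columnSum ≠ s then false
    else pvALoop array s rest

def isMagicMatrix (array : List (List Int)) : Bool :=
  if ¬ isSquareMatrix array then false
  else
    let sumToCompare := (array.headD []).sum
    pvALoop array sumToCompare (List.range array.length)

-- ===== PORT B =====
-- (Source B step for step: the guard, then one foldl carrying (all_sums : set, col_sums : vector),
--  then all_sums.update(col_sums) and len(all_sums) == 1)
def isMagicMatrix_alt (array : List (List Int)) : Bool :=
  let n := array.length
  if array.any (fun row => row.length ≠ n) then false
  else
    let st := array.foldl
      (fun (st : PySem.Set Int × List Int) row =>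
        (PySem.Set.add st.1 row.sum, (st.2.zip row).map (fun p => p.1 + p.2)))
      (PySem.Set.empty, List.replicate n (0 : Int))
    PySem.Set.len (PySem.Set.update st.1 st.2) == 1

-- ===== PRECONDITION & SPEC =====
-- Pre_ excludes only the empty matrix, on which Python A raises IndexError at sum(array[0]).
def Pre_isMagicMatrix (array : List (List Int)) : Prop := array ≠ []
instance (array : List (List Int)) : Decidable (Pre_isMagicMatrix array) := by unfold Pre_isMagicMatrix; infer_instance
def pvWitness_isMagicMatrix : List (List Int) := [[1, 2], [2, 1]]

def Spec_isMagicMatrix (array : List (List Int)) (out : Bool) : Prop := out = isMagicMatrix_alt array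
instance (array : List (List Int)) (out : Bool) : Decidable (Spec_isMagicMatrix array out) := by unfold Spec_isMagicMatrix; infer_instance

-- ===== CLAIM (what is proved, stated in full; the proofs are below) =====
def Claim_equal_isMagicMatrix : Prop := ∀ (array : List (List Int)), Dom_isMagicMatrix array → Pre_isMagicMatrix array → Spec_isMagicMatrix array (isMagicMatrix array)

-- ===== LEMMAS AND PROOFS =====

theorem pvALoop_eq_true (array : List (List Int)) (s : Int) (l : List Nat) :
    pvALoop array s l = true ↔
      ∀ i ∈ l, (array.getD i []).sum = s ∧
        (List.range (array.getD i []).length).foldl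
          (fun acc j => acc + (array.getD j []).getD i 0) 0 = s := by
  induction l with
  | nil => simp [pvALoop]
  | cons i rest ih =>
    rw [pvALoop]
    by_cases h : (array.getD i []).sum ≠ s ∨
        (List.range (array.getD i []).length).foldl
          (fun acc j => acc + (array.getD j []).getD i 0) 0 ≠ s
    · rw [if_pos h]
      simp only [Bool.false_eq_true, false_iff]
      intro hall
      rcases hall i (List.mem_cons_self) with ⟨h1, h2⟩
      rcases h with h | h <;> exact h (by assumption)
    · rw [if_neg h]
      push Not at h
      rw [ih]
      constructor
      · intro hr j hj
        rcases List.mem_cons.mp hj with rfl | hj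
        · exact h
        · exact hr j hj
      · intro hall j hj
        exact hall j (List.mem_cons_of_mem _ hj)

theorem map_getD_range {α : Type} (l : List α) (d : α) :
    (List.range l.length).map (fun j => l.getD j d) = l := by
  apply List.ext_getElem
  · simp
  · intro k h1 h2
    simp [List.getD_eq_getElem?_getD, List.getElem?_eq_getElem h2]

theorem square_iff (array : List (List Int)) :
    isSquareMatrix array = true ↔ ∀ row ∈ array, row.length = array.length := by
  simp only [isSquareMatrix, List.all_eq_true, List.mem_range, beq_iff_eq]
  constructor
  · intro h row hrow
    rcases List.mem_iff_getElem.mp hrow with ⟨i, hi, rfl⟩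
    have := h i hi
    rwa [List.getD_eq_getElem?_getD, List.getElem?_eq_getElem hi] at this
  · intro h i hi
    rw [List.getD_eq_getElem?_getD, List.getElem?_eq_getElem hi]
    exact h _ (List.getElem_mem hi)

theorem col_eq (array : List (List Int)) (i : Nat)
    (hsq : ∀ row ∈ array, row.length = array.length) (hi : i < array.length) :
    (List.range (array.getD i []).length).foldl
        (fun acc j => acc + (array.getD j []).getD i 0) 0
      = (array.map (fun row => row.getD i 0)).sum := by
  have hlen : (array.getD i []).length = array.length := by
    rw [List.getD_eq_getElem?_getD, List.getElem?_eq_getElem hi]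
    exact hsq _ (List.getElem_mem hi)
  rw [hlen, PySem.List.foldl_add, zero_add]
  have hmaps : (List.range array.length).map (fun j => (array.getD j []).getD i 0)
      = array.map (fun row => row.getD i 0) := by
    conv_rhs => rw [← map_getD_range array ([] : List Int)]
    rw [List.map_map]
    rfl
  rw [hmaps]

theorem A_iff (array : List (List Int))
    (hsq : ∀ row ∈ array, row.length = array.length) :
    isMagicMatrix array = true ↔
      (∀ row ∈ array, row.sum = (array.headD []).sum) ∧
        ∀ i < array.length, (array.map (fun row => row.getD i 0)).sum = (array.headD []).sum := by
  have hA : isSquareMatrix array = true := (square_iff array).mpr hsq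
  rw [isMagicMatrix, if_neg (by simp [hA]), pvALoop_eq_true]
  simp only [List.mem_range]
  constructor
  · intro h
    refine ⟨?_, ?_⟩
    · intro row hrow
      rcases List.mem_iff_getElem.mp hrow with ⟨i, hi, rfl⟩
      have h1 := (h i hi).1
      rwa [List.getD_eq_getElem?_getD, List.getElem?_eq_getElem hi] at h1
    · intro i hi
      have h2 := (h i hi).2
      rwa [col_eq array i hsq hi] at h2
  · rintro ⟨hrows, hcols⟩ i hi
    refine ⟨?_, ?_⟩
    · rw [List.getD_eq_getElem?_getD, List.getElem?_eq_getElem hi]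
      exact hrows _ (List.getElem_mem hi)
    · rw [col_eq array i hsq hi]
      exact hcols i hi

-- the running column-sum vector of B computes the per-column sums
theorem colfold (rows : List (List Int)) (acc : List Int)
    (h : ∀ r ∈ rows, acc.length ≤ r.length) :
    rows.foldl (fun acc row => (acc.zip row).map (fun p => p.1 + p.2)) acc
      = (List.range acc.length).map
          (fun i => acc.getD i 0 + (rows.map (fun r => r.getD i 0)).sum) := by
  induction rows generalizing acc with
  | nil =>
    simp only [List.foldl_nil, List.map_nil, List.sum_nil, add_zero]
    exact (map_getD_range acc 0).symm
  | cons r rest ih =>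
    have hr : acc.length ≤ r.length := h r List.mem_cons_self
    have hstep : ((acc.zip r).map (fun p => p.1 + p.2)).length = acc.length := by
      simp [List.length_zip, Nat.min_eq_left hr]
    rw [List.foldl_cons, ih _ (fun q hq => by
      rw [hstep]; exact h q (List.mem_cons_of_mem _ hq)), hstep]
    apply List.map_congr_left
    intro i hi
    rw [List.mem_range] at hi
    have hir : i < r.length := lt_of_lt_of_le hi hr
    have hz : ((acc.zip r).map (fun p => p.1 + p.2)).getD i 0 = acc.getD i 0 + r.getD i 0 := by
      have hiz : i < (acc.zip r).length := by simp [List.length_zip, Nat.min_eq_left hr, hi]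
      rw [List.getD_eq_getElem?_getD, List.getElem?_map, List.getElem?_eq_getElem hiz]
      simp [List.getElem_zip, List.getD_eq_getElem?_getD,
        List.getElem?_eq_getElem hi, List.getElem?_eq_getElem hir]
    rw [hz, List.map_cons, List.sum_cons]
    ring

-- a set built from c :: t is a singleton iff every element equals c
theorem ofList_len_one (c : Int) (t : List Int) :
    (PySem.Set.ofList (c :: t)).length = 1 ↔ ∀ x ∈ t, x = c := by
  rw [PySem.Set.ofList_cons, List.length_cons]
  have h0 : (((PySem.Set.ofList t).discard c).length + 1 = 1)
      ↔ ((PySem.Set.ofList t).discard c = []) := by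
    rw [← List.length_eq_zero_iff]; omega
  rw [h0, List.eq_nil_iff_forall_not_mem]
  constructor
  · intro h x hx
    by_contra hne
    exact h x (by rw [PySem.Set.mem_discard, PySem.Set.mem_ofList]; exact ⟨hx, hne⟩)
  · intro h x hx
    rw [PySem.Set.mem_discard, PySem.Set.mem_ofList] at hx
    exact hx.2 (h x hx.1)

theorem altB_iff (array : List (List Int))
    (hne : array ≠ [])
    (hsq : ∀ row ∈ array, row.length = array.length) :
    isMagicMatrix_alt array = true ↔
      (∀ row ∈ array, row.sum = (array.headD []).sum) ∧
        ∀ i < array.length, (array.map (fun row => row.getD i 0)).sum = (array.headD []).sum := by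
  rw [isMagicMatrix_alt]
  split_ifs with h1
  · obtain ⟨row, hrow, hneq⟩ : ∃ row ∈ array, row.length ≠ array.length := by simpa using h1
    exact absurd (hsq row hrow) hneq
  simp only []
  rw [PySem.List.foldl_prod_mk (f := fun s (row : List Int) => PySem.Set.add s row.sum)
      (g := fun (acc : List Int) (row : List Int) => (acc.zip row).map (fun p => p.1 + p.2))]
  -- first component: the set of row sums
  have hfst : array.foldl (fun s row => PySem.Set.add s row.sum) PySem.Set.empty
      = PySem.Set.ofList (array.map List.sum) := by
    rw [← PySem.Set.update_map_eq_foldl_add]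
    exact PySem.Set.update_nil_left _
  -- second component: the column sums
  have hsnd : array.foldl (fun acc row => (acc.zip row).map (fun p => p.1 + p.2))
      (List.replicate array.length (0 : Int))
      = (List.range array.length).map (fun i => (array.map (fun r => r.getD i 0)).sum) := by
    rw [colfold array _ (fun r hr => by simp [hsq r hr])]
    simp
  rw [hfst, hsnd, ← PySem.Set.ofList_append]
  obtain ⟨a0, rest, rfl⟩ : ∃ a0 rest, array = a0 :: rest :=
    ⟨array.headD [], array.tail, by cases array with
      | nil => exact absurd rfl hne
      | cons a t => rfl⟩
  rw [List.map_cons, List.cons_append, PySem.Set.len]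
  simp only [beq_iff_eq]
  rw [Nat.cast_eq_one, ofList_len_one]
  simp only [List.mem_append, List.mem_map, List.mem_range, List.headD_cons]
  constructor
  · intro h
    refine ⟨?_, ?_⟩
    · intro row hrow
      rcases List.mem_cons.mp hrow with rfl | hrow
      · rfl
      · exact h _ (Or.inl ⟨row, hrow, rfl⟩)
    · intro i hi
      exact h _ (Or.inr ⟨i, hi, rfl⟩)
  · rintro ⟨hrows, hcols⟩ x (⟨row, hrow, rfl⟩ | ⟨i, hi, rfl⟩)
    · exact hrows row (List.mem_cons_of_mem _ hrow)
    · exact hcols i hi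

theorem main_eq (array : List (List Int)) (hne : array ≠ []) :
    isMagicMatrix array = isMagicMatrix_alt array := by
  by_cases hsq : ∀ row ∈ array, row.length = array.length
  · rw [Bool.eq_iff_iff, A_iff array hsq, altB_iff array hne hsq]
  · have hA : isSquareMatrix array = false := by
      rw [← Bool.not_eq_true, square_iff]; exact hsq
    have hA' : isMagicMatrix array = false := by
      rw [isMagicMatrix, if_pos (by simp [hA])]
    rw [hA', isMagicMatrix_alt]
    split_ifs with h1
    · rfl
    · exfalso
      apply hsq
      intro row hrow
      by_contra hneq
      exact h1 (by simpa using ⟨row, hrow, hneq⟩)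

-- ===== VERDICT (by name: the statement is the Claim_ definition above) =====
theorem isMagicMatrix_spec : Claim_equal_isMagicMatrix := by
  intro array _ hpre
  unfold Spec_isMagicMatrix
  exact main_eq array hpre
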